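-- pv_equiv track=rewrite | github.com/jAlfa007/cg-centroide-streamlit | core/generator_contour.py | _b36_to_int
-- ===== SOURCE A (Python) =====
-- def _b36_to_int(s: str) -> int:
--     s = s.strip().lower()
--     val = 0
--     for ch in s:
--         if '0' <= ch <= '9':
--             d = ord(ch) - ord('0')
--         elif 'a' <= ch <= 'z':
--             d = 10 + (ord(ch) - ord('a'))
--         else:
--             continue
--         val = val * 36 + d
--     return val
-- ===== SOURCE B (Python) =====
-- def _b36_to_int(s: str) -> int:
--     cleaned = ''.join(c for c in s.strip().lower()
--                       if '0' <= c <= '9' or 'a' <= c <= 'z')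
--     return int(cleaned, 36) if cleaned else 0
-- ===== Notes on version B (the rewrite author's own statement) =====
-- stated objective: idiomatic
-- what changed: Replaces A's manual Horner accumulation with a filter-then-library-parse pipeline: keep only base-36 characters and hand the cleaned string to int(cleaned, 36) (C-level parse), returning 0 when nothing valid remains.
import Mathlib
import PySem

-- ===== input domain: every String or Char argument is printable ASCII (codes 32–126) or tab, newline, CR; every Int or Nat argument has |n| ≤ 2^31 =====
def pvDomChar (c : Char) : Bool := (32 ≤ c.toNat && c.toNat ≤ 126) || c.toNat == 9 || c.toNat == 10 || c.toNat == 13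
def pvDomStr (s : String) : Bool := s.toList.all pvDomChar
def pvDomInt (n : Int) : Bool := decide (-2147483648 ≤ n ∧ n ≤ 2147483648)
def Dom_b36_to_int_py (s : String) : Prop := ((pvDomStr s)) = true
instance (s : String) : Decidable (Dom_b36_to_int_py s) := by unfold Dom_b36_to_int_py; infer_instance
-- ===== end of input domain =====

-- B replaces A's manual Horner accumulation with a filter-then-parse pipeline (same cost, more idiomatic).

-- ===== PORT A =====
def b36_to_int_py (s : String) : Int :=
  (PySem.Str.lower (PySem.Str.strip s)).toList.foldl
    (fun val ch =>
      if '0' ≤ ch ∧ ch ≤ '9' then val * 36 + ((ch.toNat : Int) - 48)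
      else if 'a' ≤ ch ∧ ch ≤ 'z' then val * 36 + (10 + ((ch.toNat : Int) - 97))
      else val) 0

-- ===== PORT B =====
-- hand port of int(cleaned, 36): exact on the cleaned string, whose characters are all in 0-9/a-z
def pvParse36 (cs : List Char) : Int :=
  cs.foldl (fun acc c =>
    acc * 36 + (if '0' ≤ c ∧ c ≤ '9' then (c.toNat : Int) - 48 else 10 + ((c.toNat : Int) - 97))) 0

def b36_to_int_py_alt (s : String) : Int :=
  let cleaned := (PySem.Str.lower (PySem.Str.strip s)).toList.filter
    (fun c => ('0' ≤ c && c ≤ '9') || ('a' ≤ c && c ≤ 'z'))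
  if cleaned.isEmpty then 0 else pvParse36 cleaned

-- ===== PRECONDITION & SPEC =====
def Spec_b36_to_int_py (s : String) (out : Int) : Prop := out = b36_to_int_py_alt s
instance (s : String) (out : Int) : Decidable (Spec_b36_to_int_py s out) := by unfold Spec_b36_to_int_py; infer_instance

-- ===== CLAIM (what is proved, stated in full; the proofs are below) =====
def Claim_equal_b36_to_int_py : Prop := ∀ (s : String), Dom_b36_to_int_py s → Spec_b36_to_int_py s (b36_to_int_py s)

-- ===== LEMMAS AND PROOFS =====
theorem pv_fold_filter (l : List Char) (v : Int) :
    l.foldl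
      (fun val ch =>
        if '0' ≤ ch ∧ ch ≤ '9' then val * 36 + ((ch.toNat : Int) - 48)
        else if 'a' ≤ ch ∧ ch ≤ 'z' then val * 36 + (10 + ((ch.toNat : Int) - 97))
        else val) v
    = (l.filter (fun c => ('0' ≤ c && c ≤ '9') || ('a' ≤ c && c ≤ 'z'))).foldl
      (fun acc c =>
        acc * 36 + (if '0' ≤ c ∧ c ≤ '9' then (c.toNat : Int) - 48 else 10 + ((c.toNat : Int) - 97))) v := by
  induction l generalizing v with
  | nil => rfl
  | cons c t ih =>
    by_cases h1 : '0' ≤ c ∧ c ≤ '9'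
    · simp [List.filter, h1, ih]
    · by_cases h2 : 'a' ≤ c ∧ c ≤ 'z'
      · simp [List.filter, h1, h2, ih]
      · have hb : (('0' ≤ c && c ≤ '9') || ('a' ≤ c && c ≤ 'z')) = false := by
          simp only [Bool.or_eq_false_iff, Bool.and_eq_false_iff, decide_eq_false_iff_not]
          constructor
          · by_cases h : '0' ≤ c
            · exact Or.inr (fun hle => h1 ⟨h, hle⟩)
            · exact Or.inl h
          · by_cases h : 'a' ≤ c
            · exact Or.inr (fun hle => h2 ⟨h, hle⟩)
            · exact Or.inl h
        simp [List.filter, hb, h1, h2, ih]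

-- ===== VERDICT (by name: the statement is the Claim_ definition above) =====
theorem b36_to_int_py_spec : Claim_equal_b36_to_int_py := by
  intro s _
  unfold Spec_b36_to_int_py b36_to_int_py b36_to_int_py_alt pvParse36
  rw [pv_fold_filter]
  cases h : (PySem.Str.lower (PySem.Str.strip s)).toList.filter
      (fun c => ('0' ≤ c && c ≤ '9') || ('a' ≤ c && c ≤ 'z')) with
  | nil => simp
  | cons a t => simp
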